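-- pv_equiv track=rewrite | github.com/HandcartCactus/Knacci-Utils | python code/Debug.py | k_nacci_size
-- ===== SOURCE A (Python) =====
-- def k_nacci_size(k:int, n:int):
--     '''
--     Gives proper length of f(k,n)
--     '''
--     if n==1:
--         return 1
--     if n==2:
--         if k <= 2:
--             return 2
--         else:
--             return k
--     else:
--         return k_nacci_size(k,n-1)*(k) + k_nacci_size(k,n-2)
-- ===== SOURCE B (Python) =====
-- def k_nacci_size(k: int, n: int):
--     '''
--     Gives proper length of f(k,n)
--     '''
--     if n == 1:
--         return 1
--     a, b = 1, (2 if k <= 2 else k)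
--     for _ in range(n - 2):
--         a, b = b, b * k + a
--     return b
-- ===== Notes on version B (the rewrite author's own statement) =====
-- stated objective: faster
-- what changed: Replaces the naive double recursion with an iterative bottom-up loop keeping only the last two values.
import Mathlib
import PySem

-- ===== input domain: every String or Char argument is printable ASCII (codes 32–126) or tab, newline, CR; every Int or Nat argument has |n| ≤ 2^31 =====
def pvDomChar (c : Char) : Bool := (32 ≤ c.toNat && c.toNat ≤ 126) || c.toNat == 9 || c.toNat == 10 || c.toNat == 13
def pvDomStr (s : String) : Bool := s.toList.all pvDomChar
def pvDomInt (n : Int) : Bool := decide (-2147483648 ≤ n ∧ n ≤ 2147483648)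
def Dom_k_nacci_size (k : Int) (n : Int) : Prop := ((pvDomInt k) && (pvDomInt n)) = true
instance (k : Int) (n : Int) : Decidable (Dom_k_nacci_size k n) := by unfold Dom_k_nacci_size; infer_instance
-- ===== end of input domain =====

-- B replaces A's exponential double recursion by an O(n) bottom-up loop keeping the last two values.
-- Equivalence is proved for n ≥ 1 (for n ≤ 0 the Python A recurses forever).

-- ===== PORT A =====
-- A's recursion, transliterated on the Nat measure n.toNat (the value at 0 is
-- never reached inside Pre_: Python A diverges for n ≤ 0).
def kNacciRecA (k : Int) : Nat → Int
  | 0 => 1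
  | 1 => 1
  | 2 => if k ≤ 2 then 2 else k
  | (m+3) => kNacciRecA k (m+2) * k + kNacciRecA k (m+1)

def k_nacci_size (k : Int) (n : Int) : Int := kNacciRecA k n.toNat

-- ===== PORT B =====
def k_nacci_size_alt (k : Int) (n : Int) : Int :=
  if n = 1 then 1
  else
    let init : Int × Int := (1, if k ≤ 2 then 2 else k)
    let p := (List.range (n - 2).toNat).foldl
      (fun (st : Int × Int) _ => (st.2, st.2 * k + st.1)) init
    p.2

-- ===== PRECONDITION & SPEC =====
-- Pre_ excludes n ≤ 0, where the Python A recurses without a base case (RecursionError).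
def Pre_k_nacci_size (k : Int) (n : Int) : Prop := 1 ≤ n
instance (k : Int) (n : Int) : Decidable (Pre_k_nacci_size k n) := by unfold Pre_k_nacci_size; infer_instance
def pvWitness_k_nacci_size : Int × Int := (3, 5)

def Spec_k_nacci_size (k : Int) (n : Int) (out : Int) : Prop := out = k_nacci_size_alt k n
instance (k : Int) (n : Int) (out : Int) : Decidable (Spec_k_nacci_size k n out) := by unfold Spec_k_nacci_size; infer_instance

-- ===== CLAIM (what is proved, stated in full; the proofs are below) =====
def Claim_equal_k_nacci_size : Prop := ∀ (k : Int) (n : Int), Dom_k_nacci_size k n → Pre_k_nacci_size k n → Spec_k_nacci_size k n (k_nacci_size k n)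

-- ===== LEMMAS AND PROOFS =====

-- Loop invariant: after j iterations the state holds (A j+1, A j+2).
theorem kNacci_loop_inv (k : Int) (j : Nat) :
    (List.range j).foldl (fun (st : Int × Int) _ => (st.2, st.2 * k + st.1))
      (1, if k ≤ 2 then 2 else k)
    = (kNacciRecA k (j+1), kNacciRecA k (j+2)) := by
  induction j with
  | zero => simp [kNacciRecA]
  | succ j ih =>
      rw [List.range_succ, List.foldl_append, ih]
      simp [kNacciRecA]

theorem k_nacci_size_spec : Claim_equal_k_nacci_size := by
  intro k n _ hn
  unfold Spec_k_nacci_size k_nacci_size k_nacci_size_alt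
  by_cases h1 : n = 1
  · simp [h1, kNacciRecA]
  · have h2 : (2 : Int) ≤ n := by
      unfold Pre_k_nacci_size at hn; omega
    have hnt : n.toNat = (n - 2).toNat + 2 := by omega
    simp only [if_neg h1, kNacci_loop_inv, hnt]
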